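-- pv_equiv track=rewrite | github.com/danielc92/flask_login_system | app.py | validate_username
-- ===== SOURCE A (Python) =====
-- from string import ascii_letters
-- from string import digits
--
-- def validate_username(name):
--
--     invalid = False
--
--     for char in name:
--         if char in (ascii_letters + digits):
--             continue
--         else:
--             invalid = True
--             break
--
--     return invalid
-- ===== SOURCE B (Python) =====
-- def validate_username(name):
--     # Divide and conquer: a string contains a disallowed character iff either half does.
--     # A single character is judged by its code point against the three alphanumeric ASCII ranges.
--     if not name:
--         return False
--     if len(name) == 1:
--         o = ord(name)
--         return not (48 <= o <= 57 or 65 <= o <= 90 or 97 <= o <= 122)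
--     mid = len(name) // 2
--     return validate_username(name[:mid]) or validate_username(name[mid:])
-- ===== Notes on version B (the rewrite author's own statement) =====
-- stated objective: alternative
-- what changed: Replaces the linear flag-and-break scan with alphabet-string membership by a divide-and-conquer recursion that splits the string in halves and judges a single character arithmetically by its code point against the three ASCII ranges.
import Mathlib
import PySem

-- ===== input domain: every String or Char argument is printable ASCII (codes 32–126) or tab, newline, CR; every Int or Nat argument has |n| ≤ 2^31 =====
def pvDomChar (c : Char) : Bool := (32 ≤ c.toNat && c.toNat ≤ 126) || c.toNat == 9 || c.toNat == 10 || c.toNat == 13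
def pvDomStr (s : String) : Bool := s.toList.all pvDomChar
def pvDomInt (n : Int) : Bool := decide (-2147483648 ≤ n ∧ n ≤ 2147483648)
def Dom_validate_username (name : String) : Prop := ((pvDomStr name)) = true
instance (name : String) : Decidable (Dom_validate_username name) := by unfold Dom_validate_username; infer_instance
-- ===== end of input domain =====

-- B replaces A's flag-and-break scan over the alphabet string by a halving divide-and-conquer with code-point range checks; alternative, same result.


-- ===== PORT A =====
-- ascii_letters + digits
def pvAllowed : List Char :=
  "abcdefghijklmnopqrstuvwxyzABCDEFGHIJKLMNOPQRSTUVWXYZ0123456789".toList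

-- the for-loop with `invalid = True; break`: first char not in the allowed string decides
-- (`char in (ascii_letters + digits)` on a single char is membership in that string's characters)
def pvLoopA : List Char → Bool
  | [] => false
  | c :: rest => if pvAllowed.contains c then pvLoopA rest else true

def validate_username (name : String) : Bool := pvLoopA name.toList

-- ===== PORT B =====
-- not (48 <= o <= 57 or 65 <= o <= 90 or 97 <= o <= 122) with o = ord(c)
def pvBadChar (c : Char) : Bool :=
  !((48 ≤ c.toNat && c.toNat ≤ 57) || (65 ≤ c.toNat && c.toNat ≤ 90) ||
    (97 ≤ c.toNat && c.toNat ≤ 122))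

-- the divide-and-conquer recursion; name[:mid] / name[mid:] with 0 ≤ mid ≤ len are exactly take/drop
def pvSplitB : List Char → Bool
  | [] => false
  | [c] => pvBadChar c
  | c₀ :: c₁ :: rest =>
      pvSplitB ((c₀ :: c₁ :: rest).take ((c₀ :: c₁ :: rest).length / 2)) ||
      pvSplitB ((c₀ :: c₁ :: rest).drop ((c₀ :: c₁ :: rest).length / 2))
termination_by cs => cs.length
decreasing_by
  · simp only [List.length_take, List.length_cons]; omega
  · simp only [List.length_drop, List.length_cons]; omega

def validate_username_alt (name : String) : Bool := pvSplitB name.toList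

-- ===== PRECONDITION & SPEC =====
def Spec_validate_username (name : String) (out : Bool) : Prop := out = validate_username_alt name
instance (name : String) (out : Bool) : Decidable (Spec_validate_username name out) := by unfold Spec_validate_username; infer_instance

-- ===== CLAIM (what is proved, stated in full; the proofs are below) =====
def Claim_equal_validate_username : Prop := ∀ (name : String), Dom_validate_username name → Spec_validate_username name (validate_username name)

-- ===== LEMMAS AND PROOFS =====
theorem pvLoopA_eq_any (cs : List Char) :
    pvLoopA cs = cs.any (fun c => !pvAllowed.contains c) := by
  induction cs with
  | nil => rfl
  | cons c rest ih =>
    rw [pvLoopA, List.any_cons, ih]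
    cases hc : pvAllowed.contains c
    · simp
    · simp

theorem pvAny_congr {α : Type} (p q : α → Bool) (l : List α)
    (h : ∀ a ∈ l, p a = q a) : l.any p = l.any q := by
  induction l with
  | nil => rfl
  | cons a t ih =>
    simp only [List.any_cons, h a (List.mem_cons_self ..),
      ih (fun b hb => h b (List.mem_cons_of_mem _ hb))]

theorem pvSplitB_eq_any (cs : List Char) : pvSplitB cs = cs.any pvBadChar := by
  fun_induction pvSplitB cs with
  | case1 => rfl
  | case2 c => simp [List.any]
  | case3 c₀ c₁ rest ih1 ih2 =>
    rw [ih1, ih2, ← List.any_append, List.take_append_drop]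

theorem contains_eq_of_dom (c : Char) (hd : pvDomChar c = true) :
    pvAllowed.contains c = !pvBadChar c := by
  have h126 : c.toNat ≤ 126 := by
    simp only [pvDomChar, Bool.or_eq_true, Bool.and_eq_true, decide_eq_true_eq,
      beq_iff_eq] at hd
    omega
  have hofn : Char.ofNat c.toNat = c := Char.ofNat_toNat c
  interval_cases h : c.toNat <;> (rw [← hofn]; decide)

-- ===== VERDICT (by name: the statement is the Claim_ definition above) =====
theorem validate_username_spec : Claim_equal_validate_username := by
  intro name hdom
  show validate_username name = validate_username_alt name
  rw [validate_username, validate_username_alt, pvLoopA_eq_any, pvSplitB_eq_any]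
  refine pvAny_congr _ _ _ (fun c hc => ?_)
  have hd : pvDomChar c = true := by
    have := (List.all_eq_true.mp hdom) c hc
    simpa using this
  rw [contains_eq_of_dom c hd, Bool.not_not]
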